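-- pv_equiv track=rewrite | github.com/1-million-weed/Signals-and-Systems | Assignments/Assignment 1/old_sum_of_sinoids.py | generate_spectrum
-- ===== SOURCE A (Python) =====
-- from itertools import product
--
-- def generate_spectrum(freqs):
--     """
--     Given a list of frequencies, generate all possible frequency components
--     appearing in the product of cosines.
--
--     The product of N cosines, each with frequency f_i, can be expanded into
--     a sum of cosines with frequencies formed by all possible sign combinations
--     of f_i. That is, for each subset of frequencies, we add or subtract them
--     together to form a resulting frequency.
--
--     Example:
--     cos(2πf1t)*cos(2πf2t)
--     = [cos(2π(f1+f2)t) + cos(2π(f1−f2)t)] / 2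
--
--     For multiple frequencies, the pattern extends similarly, leading to
--     frequencies that are all possible sums and differences of the input frequencies.
--     """
--     if not freqs:
--         return []
--
--     # For each frequency fi, we can choose a sign +1 or -1.
--     # The final set of frequencies = all sums of the form sum(sign_i * f_i)
--     # with sign_i in {+1, -1}.
--     # We only consider nonnegative frequencies in the final output (take absolute values).
--     spectrum = set()
--     for signs in product([-1, 1], repeat=len(freqs)):
--         val = sum(s * f for s, f in zip(signs, freqs))
--         # Only non-negative frequencies
--         if val >= 0:
--             spectrum.add(val)
--
--     return sorted(spectrum)
-- ===== SOURCE B (Python) =====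
-- def generate_spectrum(freqs):
--     if not freqs:
--         return []
--     # Incremental subset-sum DP: reachable signed sums, duplicates collapsed each step.
--     reach = {0}
--     for f in freqs:
--         reach = {r + f for r in reach} | {r - f for r in reach}
--     return sorted(v for v in reach if v >= 0)
-- ===== Notes on version B (the rewrite author's own statement) =====
-- stated objective: faster
-- what changed: Replaces the O(N*2^N) enumeration of all sign tuples by an incremental subset-sum DP that grows the set of reachable signed sums one frequency at a time, collapsing duplicates at every step.
import Mathlib
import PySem

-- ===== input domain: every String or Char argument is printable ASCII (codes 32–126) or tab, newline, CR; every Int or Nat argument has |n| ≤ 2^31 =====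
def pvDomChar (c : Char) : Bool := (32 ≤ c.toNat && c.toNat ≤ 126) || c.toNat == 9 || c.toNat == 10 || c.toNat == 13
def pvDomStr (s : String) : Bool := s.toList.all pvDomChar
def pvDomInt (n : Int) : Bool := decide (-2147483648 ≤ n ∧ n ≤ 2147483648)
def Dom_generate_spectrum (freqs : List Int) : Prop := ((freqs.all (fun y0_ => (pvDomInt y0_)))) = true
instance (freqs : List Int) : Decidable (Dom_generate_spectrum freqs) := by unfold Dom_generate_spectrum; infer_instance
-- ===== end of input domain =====

-- B replaces A's O(N·2^N) sign-tuple enumeration by an incremental subset-sum DP over a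
-- duplicate-collapsing set of reachable sums (objective: faster).

-- ===== PORT A =====
-- itertools.product([-1, 1], repeat=n): sign tuples in Python's product order
def pvSigns : Nat → List (List Int)
  | 0 => [[]]
  | n + 1 => ([-1, 1] : List Int).flatMap (fun s => (pvSigns n).map (fun t => s :: t))

-- sum(s * f for s, f in zip(signs, freqs))
def pvSVal (signs freqs : List Int) : Int :=
  ((signs.zip freqs).map (fun p => p.1 * p.2)).sum

def generate_spectrum (freqs : List Int) : List Int :=
  if freqs = [] then []
  else
    let spectrum : PySem.Set Int :=
      (pvSigns freqs.length).foldl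
        (fun st signs =>
          let val := pvSVal signs freqs
          if 0 ≤ val then PySem.Set.add st val else st)
        PySem.Set.empty
    PySem.List.sorted spectrum (fun x => x) false

-- ===== PORT B =====
def generate_spectrum_alt (freqs : List Int) : List Int :=
  if freqs = [] then []
  else
    let reach : PySem.Set Int :=
      freqs.foldl
        (fun r f =>
          PySem.Set.union (PySem.Set.ofList (r.map (fun x => x + f))) (r.map (fun x => x - f)))
        (PySem.Set.ofList [0])
    PySem.List.sorted (reach.filter (fun v => 0 ≤ v)) (fun x => x) false

-- ===== PRECONDITION & SPEC =====
def Spec_generate_spectrum (freqs : List Int) (out : List Int) : Prop := out = generate_spectrum_alt freqs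
instance (freqs : List Int) (out : List Int) : Decidable (Spec_generate_spectrum freqs out) := by unfold Spec_generate_spectrum; infer_instance

-- ===== CLAIM (what is proved, stated in full; the proofs are below) =====
def Claim_equal_generate_spectrum : Prop := ∀ (freqs : List Int), Dom_generate_spectrum freqs → Spec_generate_spectrum freqs (generate_spectrum freqs)

-- ===== LEMMAS AND PROOFS =====

theorem pvSVal_cons (s f : Int) (t fs : List Int) :
    pvSVal (s :: t) (f :: fs) = s * f + pvSVal t fs := by
  simp [pvSVal]

theorem mem_pvSigns_succ (n : Nat) (signs : List Int) :
    signs ∈ pvSigns (n + 1) ↔ ∃ s, (s = -1 ∨ s = 1) ∧ ∃ t ∈ pvSigns n, signs = s :: t := by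
  simp only [pvSigns, List.mem_flatMap, List.mem_map, List.mem_cons,
    List.not_mem_nil, or_false]
  constructor
  · rintro ⟨s, hs, t, ht, rfl⟩
    exact ⟨s, by simpa using hs, t, ht, rfl⟩
  · rintro ⟨s, hs, t, ht, rfl⟩
    exact ⟨s, by simpa using hs, t, ht, rfl⟩

-- membership in B's reachable-sums fold, generalized over the start set
theorem mem_reach_fold (fs : List Int) (S : PySem.Set Int) (x : Int) :
    x ∈ fs.foldl
        (fun r f =>
          PySem.Set.union (PySem.Set.ofList (r.map (fun x => x + f))) (r.map (fun x => x - f)))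
        S
      ↔ ∃ r ∈ S, ∃ signs ∈ pvSigns fs.length, x = r + pvSVal signs fs := by
  induction fs generalizing S with
  | nil =>
      simp [pvSigns, pvSVal]
  | cons f fs ih =>
      rw [List.foldl_cons, ih]
      constructor
      · rintro ⟨r, hr, signs, hs, rfl⟩
        rw [PySem.Set.mem_union, PySem.Set.mem_ofList] at hr
        simp only [List.mem_map] at hr
        rcases hr with ⟨r0, hr0, rfl⟩ | ⟨r0, hr0, rfl⟩
        · refine ⟨r0, hr0, (1 : Int) :: signs, ?_, ?_⟩
          · exact (mem_pvSigns_succ _ _).2 ⟨1, Or.inr rfl, signs, hs, rfl⟩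
          · rw [pvSVal_cons]; ring
        · refine ⟨r0, hr0, (-1 : Int) :: signs, ?_, ?_⟩
          · exact (mem_pvSigns_succ _ _).2 ⟨-1, Or.inl rfl, signs, hs, rfl⟩
          · rw [pvSVal_cons]; ring
      · rintro ⟨r0, hr0, signs, hs, rfl⟩
        rcases (mem_pvSigns_succ _ _).1 hs with ⟨s, hsv, t, ht, rfl⟩
        rcases hsv with rfl | rfl
        · refine ⟨r0 - f, ?_, t, ht, by rw [pvSVal_cons]; ring⟩
          rw [PySem.Set.mem_union]
          exact Or.inr (List.mem_map.2 ⟨r0, hr0, rfl⟩)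
        · refine ⟨r0 + f, ?_, t, ht, by rw [pvSVal_cons]; ring⟩
          rw [PySem.Set.mem_union, PySem.Set.mem_ofList]
          exact Or.inl (List.mem_map.2 ⟨r0, hr0, rfl⟩)

theorem nodup_reach_fold (fs : List Int) (S : PySem.Set Int) (hS : S.Nodup) :
    (fs.foldl
        (fun r f =>
          PySem.Set.union (PySem.Set.ofList (r.map (fun x => x + f))) (r.map (fun x => x - f)))
        S).Nodup := by
  induction fs generalizing S with
  | nil => exact hS
  | cons f fs ih =>
      exact ih _ (PySem.Set.nodup_union _ _ (PySem.Set.nodup_ofList _))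

-- A's spectrum set as an explicit ofList
theorem spectrumA_eq (freqs : List Int) :
    (pvSigns freqs.length).foldl
        (fun st signs =>
          let val := pvSVal signs freqs
          if 0 ≤ val then PySem.Set.add st val else st)
        PySem.Set.empty
      = PySem.Set.ofList
          (((pvSigns freqs.length).filter (fun signs => decide (0 ≤ pvSVal signs freqs))).map
            (fun signs => pvSVal signs freqs)) := by
  rw [PySem.List.foldl_ite_eq_foldl_filter
        (p := fun signs => 0 ≤ pvSVal signs freqs)
        (f := fun st signs => PySem.Set.add st (pvSVal signs freqs))]
  rw [← PySem.Set.update_map_eq_foldl_add, PySem.Set.update_empty]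

theorem generate_spectrum_eq_alt (freqs : List Int) :
    generate_spectrum freqs = generate_spectrum_alt freqs := by
  unfold generate_spectrum generate_spectrum_alt
  by_cases h : freqs = []
  · simp [h]
  · simp only [h, reduceIte]
    rw [spectrumA_eq]
    apply PySem.List.sorted_eq_sorted_of_perm _ _ _ (fun a b hab => hab)
    rw [List.perm_ext_iff_of_nodup (PySem.Set.nodup_ofList _)
          ((nodup_reach_fold _ _ (PySem.Set.nodup_ofList _)).filter _)]
    intro x
    rw [PySem.Set.mem_ofList, List.mem_filter, mem_reach_fold]
    simp only [List.mem_map, List.mem_filter, decide_eq_true_eq, PySem.Set.mem_ofList,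
      List.mem_singleton]
    constructor
    · rintro ⟨signs, ⟨hs, hv⟩, rfl⟩
      exact ⟨⟨0, rfl, signs, hs, by ring⟩, by simpa using hv⟩
    · rintro ⟨⟨r, rfl, signs, hs, rfl⟩, hv⟩
      exact ⟨signs, ⟨hs, by simpa using hv⟩, by ring⟩

-- ===== VERDICT (by name: the statement is the Claim_ definition above) =====
theorem generate_spectrum_spec : Claim_equal_generate_spectrum := by
  intro freqs _
  exact generate_spectrum_eq_alt freqs
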